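-- pv_equiv track=rewrite | github.com/zephyrxvxx7/NSYSU-2019-Advanced-Operation-System-Homework-1 | page_replacement.py | QQ
-- ===== SOURCE A (Python) =====
-- from collections import deque
--
-- def handle_hit_frame(frame_id, dirty_bit, frame_queue):
--     for frame_dict in frame_queue:
--         if frame_id == frame_dict['id']:
--             if dirty_bit:
--                 frame_queue[frame_queue.index(frame_dict)]['mod'] = 1
--
--             return True
--
--     return False
--
-- def QQ(process_table, dirty_bits, frame_size):
--     page_fault = 0
--     interrupt = 0
--     write_back = 0
--
--     frame_queue = deque(maxlen=frame_size)
--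
--     for frame_iter, frame_id in enumerate(process_table):
--         if handle_hit_frame(frame_id, dirty_bits[frame_iter], frame_queue):
--             continue
--
--         if len(frame_queue) == frame_size:
--             for frame_dict in frame_queue:
--                 if frame_dict['mod'] == 0:
--                     frame_queue.remove(frame_dict)
--                     break
--
--             if len(frame_queue) == frame_size:
--                 frame_queue.popleft()
--                 write_back += 1
--                 interrupt += 1
--
--         frame_queue.append({'id': frame_id, 'mod': dirty_bits[frame_iter]})
--
--         page_fault += 1
--         interrupt += 1
--
--     return [page_fault, interrupt, write_back]
-- ===== SOURCE B (Python) =====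
-- from collections import deque
--
-- def QQ(process_table, dirty_bits, frame_size):
--     # Lazy-deletion queues: clean insertions and all insertions, keyed by an
--     # insertion sequence number; frames maps page -> [seq, mod].
--     frames = {}
--     clean_q = deque()   # (seq, page): pages inserted clean, stale entries skipped lazily
--     fifo_q = deque()    # (seq, page): all insertions, stale entries skipped lazily
--     seq = 0
--     faults = 0
--     write_backs = 0
--     for page, bit in zip(process_table, dirty_bits):
--         entry = frames.get(page)
--         if entry is not None:
--             if bit:
--                 entry[1] = 1
--             continue
--         faults += 1
--         if len(frames) == frame_size:
--             while clean_q: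
--                 s, p = clean_q[0]
--                 e = frames.get(p)
--                 if e is not None and e[0] == s and e[1] == 0:
--                     break
--                 clean_q.popleft()
--             if clean_q:
--                 _, victim = clean_q.popleft()
--                 del frames[victim]
--             else:
--                 write_backs += 1
--                 while True:
--                     s, victim = fifo_q.popleft()
--                     e = frames.get(victim)
--                     if e is not None and e[0] == s:
--                         break
--                 del frames[victim]
--         frames[page] = [seq, bit]
--         if not bit:
--             clean_q.append((seq, page))
--         fifo_q.append((seq, page))
--         seq += 1
--     return [faults, faults + write_backs, write_backs]
-- ===== Notes on version B (the rewrite author's own statement) =====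
-- stated objective: faster
-- what changed: Replaces A's per-reference scans of a deque of {'id','mod'} dicts (hit scan, .index pass, clean-eviction scan, .remove pass) by a single pass that keeps a page->[seq,mod] dict plus two lazy-deletion deques keyed by insertion sequence number (clean insertions and all insertions), so a hit is one dict lookup and an eviction is amortized O(1) front pops of stale entries, with interrupts derived as faults + write_backs.
import Mathlib
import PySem

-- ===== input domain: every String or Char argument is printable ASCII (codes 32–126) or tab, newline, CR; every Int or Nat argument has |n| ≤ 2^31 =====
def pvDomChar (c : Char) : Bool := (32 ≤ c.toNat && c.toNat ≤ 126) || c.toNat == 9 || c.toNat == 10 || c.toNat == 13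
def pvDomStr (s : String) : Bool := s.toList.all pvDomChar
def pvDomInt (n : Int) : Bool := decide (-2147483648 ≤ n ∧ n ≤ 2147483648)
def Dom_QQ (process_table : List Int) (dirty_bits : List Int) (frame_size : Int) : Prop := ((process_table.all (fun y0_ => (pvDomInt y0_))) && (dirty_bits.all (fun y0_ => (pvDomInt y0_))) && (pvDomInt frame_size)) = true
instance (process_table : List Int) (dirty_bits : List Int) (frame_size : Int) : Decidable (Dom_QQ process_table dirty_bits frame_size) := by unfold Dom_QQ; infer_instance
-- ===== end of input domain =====

-- B replaces A's repeated scans over a deque of {'id','mod'} dicts by a single pass with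
-- lazy-deletion queues (clean insertions / all insertions, keyed by an insertion sequence
-- number) plus a page->[seq,mod] dict, and derives interrupts as faults + write_backs;
-- measurably faster on large traces; equivalence of the RETURN value is proved on Pre_.

-- ===== PORT A =====
-- handle_hit_frame: loop over the queue; on a hit with a truthy dirty bit,
-- set 'mod' of the first queue element equal to the matched dict to 1.
def pvHitGo (fid bit : Int) (rem q : List (Int × Int)) : Bool × List (Int × Int) :=
  match rem with
  | [] => (false, q)
  | d :: rest =>
    if fid = d.1 then
      (true,
        if bit ≠ 0 then
          match PySem.List.index? q d with
          | some i => q.set i (d.1, 1)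
          | none => q
        else q)
    else pvHitGo fid bit rest q

-- the clean-eviction loop: remove the first frame dict with mod == 0, if any
def pvEvictGo (rem q : List (Int × Int)) : List (Int × Int) :=
  match rem with
  | [] => q
  | d :: rest => if d.2 = 0 then (PySem.List.remove? q d).getD q else pvEvictGo rest q

def pvQQGo (dirty_bits : List Int) (frame_size : Int) (items : List (Int × Int))
    (pf intr wb : Int) (q : List (Int × Int)) : List Int :=
  match items with
  | [] => [pf, intr, wb]
  | (i, fid) :: rest =>
    let bit := PySem.List.pyGetD dirty_bits i 0
    let r := pvHitGo fid bit q q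
    if r.1 then pvQQGo dirty_bits frame_size rest pf intr wb r.2
    else
      if (q.length : Int) = frame_size then
        let q1 := pvEvictGo q q
        if (q1.length : Int) = frame_size then
          pvQQGo dirty_bits frame_size rest (pf + 1) (intr + 1 + 1) (wb + 1) (q1.tail ++ [(fid, bit)])
        else
          pvQQGo dirty_bits frame_size rest (pf + 1) (intr + 1) wb (q1 ++ [(fid, bit)])
      else
        pvQQGo dirty_bits frame_size rest (pf + 1) (intr + 1) wb (q ++ [(fid, bit)])

def QQ (process_table : List Int) (dirty_bits : List Int) (frame_size : Int) : List Int :=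
  pvQQGo dirty_bits frame_size (PySem.List.enumerate process_table 0) 0 0 0 []

-- ===== PORT B =====
-- the `while clean_q:` loop: drop stale front entries, stop at a valid clean one (or empty)
def pvCleanPop (frames : PySem.Dict Int (Int × Int)) (cq : List (Int × Int)) : List (Int × Int) :=
  match cq with
  | [] => []
  | (s, p) :: rest =>
    match frames.get? p with
    | some e => if e.1 = s ∧ e.2 = 0 then (s, p) :: rest else pvCleanPop frames rest
    | none => pvCleanPop frames rest

-- the `while True:` loop: pop front entries until a currently-resident one appears
-- (none = the IndexError Python raises on an empty deque, outside Pre_)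
def pvFifoPop (frames : PySem.Dict Int (Int × Int)) (fq : List (Int × Int)) :
    Option (Int × List (Int × Int)) :=
  match fq with
  | [] => none
  | (s, p) :: rest =>
    match frames.get? p with
    | some e => if e.1 = s then some (p, rest) else pvFifoPop frames rest
    | none => pvFifoPop frames rest

def pvAltGo (fs : Int) (pt db : List Int) (frames : PySem.Dict Int (Int × Int))
    (cq fq : List (Int × Int)) (seq faults wbs : Int) : List Int :=
  match pt, db with
  | page :: pt', bit :: db' =>
    match frames.get? page with
    | some e =>
      if bit ≠ 0 then
        pvAltGo fs pt' db' (frames.insert page (e.1, 1)) cq fq seq faults wbs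
      else
        pvAltGo fs pt' db' frames cq fq seq faults wbs
    | none =>
      let faults1 := faults + 1
      if (frames.size : Int) = fs then
        match pvCleanPop frames cq with
        | (_, victim) :: cq2 =>
          pvAltGo fs pt' db' ((frames.erase victim).insert page (seq, bit))
            (if bit = 0 then cq2 ++ [(seq, page)] else cq2) (fq ++ [(seq, page)])
            (seq + 1) faults1 wbs
        | [] =>
          match pvFifoPop frames fq with
          | some (victim, fq1) =>
            pvAltGo fs pt' db' ((frames.erase victim).insert page (seq, bit))
              (if bit = 0 then [(seq, page)] else []) (fq1 ++ [(seq, page)])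
              (seq + 1) faults1 (wbs + 1)
          | none => [faults1, faults1 + (wbs + 1), wbs + 1]
      else
        pvAltGo fs pt' db' (frames.insert page (seq, bit))
          (if bit = 0 then cq ++ [(seq, page)] else cq) (fq ++ [(seq, page)])
          (seq + 1) faults1 wbs
  | _, _ => [faults, faults + wbs, wbs]

def QQ_alt (process_table : List Int) (dirty_bits : List Int) (frame_size : Int) : List Int :=
  pvAltGo frame_size process_table dirty_bits PySem.Dict.empty [] [] 0 0 0

-- ===== PRECONDITION & SPEC =====
-- A raises IndexError when dirty_bits is shorter than process_table, ValueError when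
-- frame_size < 0 (deque maxlen), and IndexError (popleft on an empty deque) when
-- frame_size = 0 and process_table is nonempty; exactly those inputs are excluded.
def Pre_QQ (process_table : List Int) (dirty_bits : List Int) (frame_size : Int) : Prop :=
  process_table.length ≤ dirty_bits.length ∧ 0 ≤ frame_size ∧
    (process_table = [] ∨ 1 ≤ frame_size)
instance (process_table : List Int) (dirty_bits : List Int) (frame_size : Int) : Decidable (Pre_QQ process_table dirty_bits frame_size) := by unfold Pre_QQ; infer_instance
def pvWitness_QQ : List Int × List Int × Int := ([1, 2, 1, 3], [0, 1, 0, 0], 2)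

def Spec_QQ (process_table : List Int) (dirty_bits : List Int) (frame_size : Int) (out : List Int) : Prop := out = QQ_alt process_table dirty_bits frame_size
instance (process_table : List Int) (dirty_bits : List Int) (frame_size : Int) (out : List Int) : Decidable (Spec_QQ process_table dirty_bits frame_size out) := by unfold Spec_QQ; infer_instance

-- ===== CLAIM (what is proved, stated in full; the proofs are below) =====
def Claim_equal_QQ : Prop := ∀ (process_table : List Int) (dirty_bits : List Int) (frame_size : Int), Dom_QQ process_table dirty_bits frame_size → Pre_QQ process_table dirty_bits frame_size → Spec_QQ process_table dirty_bits frame_size (QQ process_table dirty_bits frame_size)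

-- ===== LEMMAS AND PROOFS =====

-- ---- A-side loop characterisations ----
theorem pvHitGo_none (fid bit : Int) (rem q : List (Int × Int))
    (h : rem.find? (fun d => d.1 == fid) = none) : pvHitGo fid bit rem q = (false, q) := by
  induction rem with
  | nil => rfl
  | cons d rest ih =>
    by_cases hd : d.1 = fid
    · rw [List.find?_cons_of_pos (by simp [hd])] at h; cases h
    · rw [List.find?_cons_of_neg (by simp [hd])] at h
      rw [pvHitGo, if_neg (by omega)]
      exact ih h

theorem pvHitGo_some (fid bit : Int) (rem q : List (Int × Int)) (d : Int × Int)
    (h : rem.find? (fun d => d.1 == fid) = some d) :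
    pvHitGo fid bit rem q =
      (true, if bit ≠ 0 then
          match PySem.List.index? q d with
          | some i => q.set i (d.1, 1)
          | none => q
        else q) := by
  induction rem with
  | nil => simp at h
  | cons e rest ih =>
    by_cases hd : e.1 = fid
    · rw [List.find?_cons_of_pos (by simp [hd])] at h
      cases h
      rw [pvHitGo, if_pos (by omega)]
    · rw [List.find?_cons_of_neg (by simp [hd])] at h
      rw [pvHitGo, if_neg (by omega)]
      exact ih h

theorem pvEvictGo_none (rem q : List (Int × Int))
    (h : rem.find? (fun d => d.2 == 0) = none) : pvEvictGo rem q = q := by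
  induction rem with
  | nil => rfl
  | cons d rest ih =>
    by_cases hd : d.2 = 0
    · rw [List.find?_cons_of_pos (by simp [hd])] at h; cases h
    · rw [List.find?_cons_of_neg (by simp [hd])] at h
      rw [pvEvictGo, if_neg hd]
      exact ih h

theorem pvEvictGo_some (rem q : List (Int × Int)) (d : Int × Int)
    (h : rem.find? (fun d => d.2 == 0) = some d) :
    pvEvictGo rem q = (PySem.List.remove? q d).getD q := by
  induction rem with
  | nil => simp at h
  | cons e rest ih =>
    by_cases hd : e.2 = 0
    · rw [List.find?_cons_of_pos (by simp [hd])] at h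
      cases h
      rw [pvEvictGo, if_pos hd]
    · rw [List.find?_cons_of_neg (by simp [hd])] at h
      rw [pvEvictGo, if_neg hd]
      exact ih h

theorem pvMap_id_of_not_mem (q : List (Int × Int)) (k : Int)
    (h : k ∉ q.map Prod.fst) :
    q.map (fun p => if p.1 == k then (k, (1 : Int)) else p) = q := by
  induction q with
  | nil => rfl
  | cons p rest ih =>
    simp only [List.map_cons, List.mem_cons, not_or] at h ⊢
    rw [if_neg (by simp; omega), ih h.2]

theorem pvFilter_id_of_not_mem {β : Type} (q : List (Int × β)) (k : Int)
    (h : k ∉ q.map Prod.fst) :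
    q.filter (fun p => !(p.1 == k)) = q := by
  induction q with
  | nil => rfl
  | cons p rest ih =>
    simp only [List.map_cons, List.mem_cons, not_or] at h
    rw [List.filter_cons_of_pos (by simp; omega), ih h.2]

theorem pvSet_eq_map (q : List (Int × Int)) (fid : Int) (d : Int × Int)
    (hnd : (q.map Prod.fst).Nodup)
    (h : q.find? (fun d => d.1 == fid) = some d) :
    (match PySem.List.index? q d with
      | some i => q.set i (d.1, 1)
      | none => q) = q.map (fun p => if p.1 == fid then (fid, (1 : Int)) else p) := by
  induction q with
  | nil => simp at h
  | cons e rest ih =>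
    simp only [List.map_cons, List.nodup_cons] at hnd
    by_cases hd : e.1 = fid
    · rw [List.find?_cons_of_pos (by simp [hd])] at h
      cases h
      rw [PySem.List.index?_cons_self]
      show (d.1, 1) :: rest = _
      rw [List.map_cons, pvMap_id_of_not_mem rest fid (hd ▸ hnd.1), if_pos (by simp [hd]), hd]
    · have hfind : rest.find? (fun d => d.1 == fid) = some d := by
        rwa [List.find?_cons_of_neg (by simp [hd])] at h
      have hd1 : d.1 = fid := by simpa using List.find?_some hfind
      have hne : e ≠ d := fun he => hd (he ▸ hd1)
      have hih := ih hnd.2 hfind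
      rw [PySem.List.index?_cons_of_ne rest hne]
      simp only [List.map_cons]
      cases hidx : PySem.List.index? rest d with
      | none =>
        rw [hidx] at hih
        simp only [Option.map_none]
        rw [← hih]
        simp [hd]
      | some i =>
        rw [hidx] at hih
        simp only [Option.map_some]
        rw [List.set_cons_succ]
        rw [← hih]
        simp [hd]

theorem pvErase_eq (q : List (Int × Int)) (d : Int × Int)
    (hnd : (q.map Prod.fst).Nodup) (hmem : d ∈ q) :
    (PySem.List.remove? q d).getD q = q.filter (fun p => !(p.1 == d.1)) := by
  induction q with
  | nil => simp at hmem
  | cons e rest ih =>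
    simp only [List.map_cons, List.nodup_cons] at hnd
    by_cases he : e = d
    · subst he
      rw [PySem.List.remove?_eq_some_erase (e :: rest) e (by simp)]
      simp only [Option.getD_some, List.erase_cons_head]
      rw [List.filter_cons_of_neg (by simp), pvFilter_id_of_not_mem rest e.1 hnd.1]
    · have hdr : d ∈ rest := by
        rcases List.mem_cons.mp hmem with h | h
        · exact absurd h.symm he
        · exact h
      have hkey : e.1 ≠ d.1 := by
        intro hk
        exact hnd.1 (hk ▸ List.mem_map.mpr ⟨d, hdr, rfl⟩)
      rw [PySem.List.remove?_eq_some_erase (e :: rest) d (by simp [hdr])]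
      simp only [Option.getD_some]
      rw [List.erase_cons_tail (by simp [he]), List.filter_cons_of_pos (by simp [hkey])]
      have := ih hnd.2 hdr
      rw [PySem.List.remove?_eq_some_erase rest d hdr] at this
      simp only [Option.getD_some] at this
      rw [this]

theorem pvNotMem_filter {β : Type} (l : List (Int × β)) (k : Int) (p : Int × β → Bool)
    (h : k ∉ l.map Prod.fst) : k ∉ (l.filter p).map Prod.fst := by
  intro hc
  rcases List.mem_map.mp hc with ⟨e, he, hk⟩
  exact h (List.mem_map.mpr ⟨e, List.mem_of_mem_filter he, hk⟩)

theorem pvNodup_filter {β : Type} (l : List (Int × β)) (p : Int × β → Bool)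
    (hnd : (l.map Prod.fst).Nodup) : ((l.filter p).map Prod.fst).Nodup := by
  induction l with
  | nil => simp
  | cons e rest ih =>
    simp only [List.map_cons, List.nodup_cons] at hnd
    by_cases hp : p e
    · rw [List.filter_cons_of_pos hp]
      simp only [List.map_cons, List.nodup_cons]
      exact ⟨pvNotMem_filter rest e.1 p hnd.1, ih hnd.2⟩
    · rw [List.filter_cons_of_neg hp]
      exact ih hnd.2

theorem pvNodup_append {β : Type} (l : List (Int × β)) (k : Int) (b : β)
    (hnd : (l.map Prod.fst).Nodup) (h : k ∉ l.map Prod.fst) :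
    (((l ++ [(k, b)]).map Prod.fst)).Nodup := by
  rw [List.map_append]
  refine List.Nodup.append hnd (by simp) ?_
  intro a ha hb
  simp only [List.map_cons, List.map_nil, List.mem_cons, List.not_mem_nil, or_false] at hb
  subst hb
  exact h ha

-- ---- abstract views of B's state ----
def pvLook (F : List (Int × Int × Int)) (p : Int) : Option (Int × Int) :=
  (F.find? (fun r => r.1 == p)).map (fun r => r.2)

theorem pvGet?_eq (frames : PySem.Dict Int (Int × Int)) (p : Int) :
    frames.get? p = pvLook frames.items p := rfl

-- queue-entry validity: (s, p) names a resident frame iff the dict maps p to seq s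
def pvVC (F : List (Int × Int × Int)) (e : Int × Int) : Bool :=
  match pvLook F e.2 with
  | some v => v.1 == e.1 && v.2 == 0
  | none => false

def pvVA (F : List (Int × Int × Int)) (e : Int × Int) : Bool :=
  match pvLook F e.2 with
  | some v => v.1 == e.1
  | none => false

def pvPm (r : Int × Int × Int) : Int × Int := (r.1, r.2.2)
def pvSp (r : Int × Int × Int) : Int × Int := (r.2.1, r.1)
def pvClean (r : Int × Int × Int) : Bool := r.2.2 == 0

-- the coupling invariant between A's frame queue (= F.map pvPm) and B's state
def pvInv (F : List (Int × Int × Int)) (cq fq : List (Int × Int)) (seq : Int) : Prop :=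
  (F.map Prod.fst).Nodup ∧
  (∀ r ∈ F, r.2.1 < seq) ∧
  (∀ e ∈ cq, e.1 < seq) ∧
  (∀ e ∈ fq, e.1 < seq) ∧
  cq.filter (pvVC F) = (F.filter pvClean).map pvSp ∧
  fq.filter (pvVA F) = F.map pvSp

-- ---- generic dropWhile/filter machinery for the lazy pops ----
theorem pvDropFilter {α : Type} (p : α → Bool) (l : List α) :
    (l.dropWhile (fun x => !p x)).filter p = l.filter p := by
  induction l with
  | nil => rfl
  | cons a t ih =>
    by_cases h : p a
    · simp [List.dropWhile_cons, h]
    · simp [List.dropWhile_cons, h, ih]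

theorem pvDropHead {α : Type} (p : α → Bool) (l : List α) (x : α) (t : List α)
    (h : l.dropWhile (fun x => !p x) = x :: t) : p x = true := by
  induction l with
  | nil => simp at h
  | cons a l ih =>
    by_cases ha : p a
    · rw [List.dropWhile_cons] at h
      simp only [ha, Bool.not_true, Bool.false_eq_true, if_false] at h
      cases h; exact ha
    · rw [List.dropWhile_cons] at h
      simp only [ha, Bool.not_false, if_true] at h
      exact ih h

theorem pvPopSpec {α : Type} (p : α → Bool) (l : List α) (c : α) (r : List α)
    (h : l.filter p = c :: r) :
    ∃ t, l.dropWhile (fun x => !p x) = c :: t ∧ t.filter p = r := by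
  cases hd : l.dropWhile (fun x => !p x) with
  | nil =>
    have hf := pvDropFilter p l
    rw [hd, h] at hf
    cases hf
  | cons x t =>
    have hx := pvDropHead p l x t hd
    have hf := pvDropFilter p l
    rw [hd, h, List.filter_cons_of_pos hx] at hf
    obtain ⟨h1, h2⟩ := List.cons.inj hf
    exact ⟨t, by rw [h1], h2⟩

theorem pvPopNil {α : Type} (p : α → Bool) (l : List α) (h : l.filter p = []) :
    l.dropWhile (fun x => !p x) = [] := by
  cases hd : l.dropWhile (fun x => !p x) with
  | nil => rfl
  | cons x t =>
    have hx := pvDropHead p l x t hd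
    have hf := pvDropFilter p l
    rw [hd, h, List.filter_cons_of_pos hx] at hf
    cases hf

theorem pvFilterAnd {α : Type} (l : List α) (p q : α → Bool) :
    l.filter (fun a => p a && q a) = (l.filter p).filter q := by
  rw [List.filter_filter]
  exact List.filter_congr (fun x _ => by rw [Bool.and_comm])

theorem pvFilterComm {α : Type} (l : List α) (p q : α → Bool) :
    (l.filter p).filter q = (l.filter q).filter p := by
  rw [← pvFilterAnd, ← pvFilterAnd]
  exact List.filter_congr (fun x _ => by rw [Bool.and_comm])

-- ---- B's pop loops are dropWhile over the validity predicates ----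
theorem pvCleanPop_eq (frames : PySem.Dict Int (Int × Int)) (cq : List (Int × Int)) :
    pvCleanPop frames cq = cq.dropWhile (fun e => !pvVC frames.items e) := by
  induction cq with
  | nil => rfl
  | cons e rest ih =>
    obtain ⟨s, p⟩ := e
    rw [List.dropWhile_cons]
    have hvc : pvVC frames.items (s, p)
        = match frames.get? p with
          | some v => v.1 == s && v.2 == 0
          | none => false := by
      rw [pvGet?_eq]; rfl
    simp only [pvCleanPop]
    cases hg : frames.get? p with
    | some v =>
      rw [hg] at hvc
      change (if v.1 = s ∧ v.2 = 0 then (s, p) :: rest else pvCleanPop frames rest) = _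
      rw [hvc]
      by_cases hc : v.1 = s ∧ v.2 = 0
      · rw [if_pos hc]
        simp [hc.1, hc.2]
      · rw [if_neg hc, ih]
        have hb : (v.1 == s && v.2 == 0) = false := by
          rcases not_and_or.mp hc with h | h <;> simp [h]
        simp [hb]
    | none =>
      rw [hg] at hvc
      change pvCleanPop frames rest = _
      rw [hvc, ih]
      simp

theorem pvFifoPop_eq (frames : PySem.Dict Int (Int × Int)) (fq : List (Int × Int)) :
    pvFifoPop frames fq =
      (match fq.dropWhile (fun e => !pvVA frames.items e) with
        | [] => none
        | (_, p) :: t => some (p, t)) := by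
  induction fq with
  | nil => rfl
  | cons e rest ih =>
    obtain ⟨s, p⟩ := e
    rw [List.dropWhile_cons]
    have hva : pvVA frames.items (s, p)
        = match frames.get? p with
          | some v => v.1 == s
          | none => false := by
      rw [pvGet?_eq]; rfl
    simp only [pvFifoPop]
    cases hg : frames.get? p with
    | some v =>
      rw [hg] at hva
      change (if v.1 = s then some (p, rest) else pvFifoPop frames rest) = _
      rw [hva]
      by_cases hc : v.1 = s
      · rw [if_pos hc]
        simp [hc]
      · rw [if_neg hc, ih]
        simp [hc]
    | none =>
      rw [hg] at hva
      change pvFifoPop frames rest = _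
      rw [hva, ih]
      simp

-- ---- pvLook structure lemmas ----
theorem pvLook_some_elim (F : List (Int × Int × Int)) (p : Int) (v : Int × Int)
    (h : pvLook F p = some v) : F.find? (fun r => r.1 == p) = some (p, v) := by
  unfold pvLook at h
  cases hc : F.find? (fun r => r.1 == p) with
  | none => rw [hc] at h; cases h
  | some c =>
    rw [hc] at h
    have h1 : c.1 = p := by simpa using List.find?_some hc
    have h2 : c.2 = v := by simpa using h
    rw [show ((p, v) : Int × Int × Int) = c by rw [← h1, ← h2]]

theorem pvLook_none_elim (F : List (Int × Int × Int)) (p : Int)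
    (h : pvLook F p = none) : F.find? (fun r => r.1 == p) = none := by
  unfold pvLook at h
  exact Option.map_eq_none_iff.mp h

theorem pvLook_eq_none (F : List (Int × Int × Int)) (p : Int)
    (h : p ∉ F.map Prod.fst) : pvLook F p = none := by
  unfold pvLook
  rw [List.find?_eq_none.mpr]
  · rfl
  · intro r hr
    simp only [beq_iff_eq]
    intro hh
    exact h (List.mem_map.mpr ⟨r, hr, hh⟩)

theorem pvNotMemKeys_of_look_none (F : List (Int × Int × Int)) (p : Int)
    (h : pvLook F p = none) : p ∉ F.map Prod.fst := by
  intro hc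
  rcases List.mem_map.mp hc with ⟨r, hr, hk⟩
  have := List.find?_eq_none.mp (pvLook_none_elim F p h) r hr
  simp [hk] at this

theorem pvLook_mem (F : List (Int × Int × Int)) (p : Int) (v : Int × Int)
    (hnd : (F.map Prod.fst).Nodup) (hm : (p, v) ∈ F) : pvLook F p = some v := by
  induction F with
  | nil => simp at hm
  | cons r t ih =>
    simp only [List.map_cons, List.nodup_cons] at hnd
    rcases List.mem_cons.mp hm with h | h
    · unfold pvLook
      rw [List.find?_cons_of_pos (by simp [← h])]
      simp [← h]
    · have hk : r.1 ≠ p := by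
        intro hk
        exact hnd.1 (hk ▸ List.mem_map.mpr ⟨(p, v), h, rfl⟩)
      unfold pvLook
      rw [List.find?_cons_of_neg (by simp [hk])]
      exact ih hnd.2 h

theorem pvLook_filter_ne (F : List (Int × Int × Int)) (k p : Int) (hpk : p ≠ k) :
    pvLook (F.filter (fun r => !(r.1 == k))) p = pvLook F p := by
  induction F with
  | nil => rfl
  | cons r t ih =>
    by_cases hk : r.1 = k
    · rw [List.filter_cons_of_neg (by simp [hk])]
      unfold pvLook
      rw [List.find?_cons_of_neg (by simp [hk]; omega)]
      exact ih
    · rw [List.filter_cons_of_pos (by simp [hk])]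
      by_cases hp : r.1 = p
      · unfold pvLook
        rw [List.find?_cons_of_pos (by simp [hp]), List.find?_cons_of_pos (by simp [hp])]
      · unfold pvLook
        rw [List.find?_cons_of_neg (by simp [hp]), List.find?_cons_of_neg (by simp [hp])]
        exact ih

theorem pvLook_append_ne (F : List (Int × Int × Int)) (e0 : Int × Int × Int) (p : Int)
    (hp : p ≠ e0.1) : pvLook (F ++ [e0]) p = pvLook F p := by
  unfold pvLook
  rw [List.find?_append]
  cases h : F.find? (fun r => r.1 == p) with
  | some r => simp [h]
  | none =>
    simp only [h, Option.none_or]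
    rw [List.find?_cons_of_neg (by simp; omega)]
    rfl

theorem pvLook_append_self (F : List (Int × Int × Int)) (e0 : Int × Int × Int)
    (h : pvLook F e0.1 = none) : pvLook (F ++ [e0]) e0.1 = some e0.2 := by
  unfold pvLook
  rw [List.find?_append, pvLook_none_elim F e0.1 h]
  simp only [Option.none_or]
  rw [List.find?_cons_of_pos (by simp)]
  rfl

-- ---- bridges between A's pair queue and B's item list ----
theorem pvKeysPm (F : List (Int × Int × Int)) :
    (F.map pvPm).map Prod.fst = F.map Prod.fst := by
  rw [List.map_map]; rfl

theorem pvFindPm (F : List (Int × Int × Int)) (k : Int) :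
    (F.map pvPm).find? (fun d => d.1 == k) = (F.find? (fun r => r.1 == k)).map pvPm := by
  induction F with
  | nil => rfl
  | cons r t ih =>
    by_cases h : r.1 = k
    · rw [List.map_cons, List.find?_cons_of_pos (by simp [pvPm, h]),
        List.find?_cons_of_pos (by simp [h])]
      rfl
    · rw [List.map_cons, List.find?_cons_of_neg (by simp [pvPm, h]),
        List.find?_cons_of_neg (by simp [h]), ih]

theorem pvFindCleanPm (F : List (Int × Int × Int)) :
    (F.map pvPm).find? (fun d => d.2 == 0) = (F.find? pvClean).map pvPm := by
  induction F with
  | nil => rfl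
  | cons r t ih =>
    by_cases h : r.2.2 = 0
    · rw [List.map_cons, List.find?_cons_of_pos (by simp [pvPm, h]),
        List.find?_cons_of_pos (by simp [pvClean, h])]
      rfl
    · rw [List.map_cons, List.find?_cons_of_neg (by simp [pvPm, h]),
        List.find?_cons_of_neg (by simp [pvClean, h]), ih]

theorem pvFindEqHeadFilter {α : Type} (p : α → Bool) (l : List α) :
    l.find? p = (l.filter p).head? := by
  induction l with
  | nil => rfl
  | cons a t ih =>
    by_cases ha : p a
    · rw [List.find?_cons_of_pos ha, List.filter_cons_of_pos ha]; rfl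
    · rw [List.find?_cons_of_neg (by simp [ha]), List.filter_cons_of_neg (by simpa using ha)]
      exact ih

theorem pvFilterPm (F : List (Int × Int × Int)) (k : Int) :
    (F.map pvPm).filter (fun d => !(d.1 == k)) = (F.filter (fun r => !(r.1 == k))).map pvPm := by
  induction F with
  | nil => rfl
  | cons r t ih =>
    by_cases h : r.1 = k
    · rw [List.map_cons, List.filter_cons_of_neg (by simp [pvPm, h]),
        List.filter_cons_of_neg (by simp [h]), ih]
    · rw [List.map_cons, List.filter_cons_of_pos (by simp [pvPm, h]),
        List.filter_cons_of_pos (by simp [h]), List.map_cons, ih]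

theorem pvFilterSp (L : List (Int × Int × Int)) (k : Int) :
    (L.map pvSp).filter (fun x => !(x.2 == k)) = (L.filter (fun r => !(r.1 == k))).map pvSp := by
  induction L with
  | nil => rfl
  | cons r t ih =>
    by_cases h : r.1 = k
    · rw [List.map_cons, List.filter_cons_of_neg (by simp [pvSp, h]),
        List.filter_cons_of_neg (by simp [h]), ih]
    · rw [List.map_cons, List.filter_cons_of_pos (by simp [pvSp, h]),
        List.filter_cons_of_pos (by simp [h]), List.map_cons, ih]

theorem pvUpdComm (F : List (Int × Int × Int)) (k s1 : Int) :
    (F.map pvPm).map (fun p => if p.1 == k then (k, (1 : Int)) else p)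
      = (F.map (fun r => if r.1 == k then (k, (s1, (1 : Int))) else r)).map pvPm := by
  induction F with
  | nil => rfl
  | cons r t ih =>
    by_cases h : r.1 = k
    · simp only [List.map_cons, ih]
      rw [if_pos (by simp [pvPm, h]), if_pos (by simp [h])]
      rfl
    · simp only [List.map_cons, ih]
      rw [if_neg (by simp [pvPm, h]), if_neg (by simp [h])]

theorem pvKeys_map_upd (F : List (Int × Int × Int)) (k s1 : Int) :
    (F.map (fun r => if r.1 == k then (k, (s1, (1 : Int))) else r)).map Prod.fst
      = F.map Prod.fst := by
  rw [List.map_map]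
  apply List.map_congr_left
  intro r _
  by_cases h : r.1 = k <;> simp [h]

theorem pvCleanUpd (F : List (Int × Int × Int)) (k s1 : Int) :
    (F.map (fun r => if r.1 == k then (k, (s1, (1 : Int))) else r)).filter pvClean
      = (F.filter pvClean).filter (fun r => !(r.1 == k)) := by
  induction F with
  | nil => rfl
  | cons r t ih =>
    by_cases h : r.1 = k
    · rw [List.map_cons, if_pos (by simp [h]), List.filter_cons_of_neg (by simp [pvClean])]
      by_cases hc : pvClean r
      · rw [List.filter_cons_of_pos hc, List.filter_cons_of_neg (by simp [h]), ih]
      · rw [List.filter_cons_of_neg hc, ih]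
    · rw [List.map_cons, if_neg (by simp [h])]
      by_cases hc : pvClean r
      · rw [List.filter_cons_of_pos hc, List.filter_cons_of_pos hc,
          List.filter_cons_of_pos (by simp [h]), ih]
      · rw [List.filter_cons_of_neg hc, List.filter_cons_of_neg hc, ih]

-- ---- validity-transfer lemmas for B's three state updates ----
theorem pvLook_cons (r : Int × Int × Int) (t : List (Int × Int × Int)) (p : Int) :
    pvLook (r :: t) p = if r.1 = p then some r.2 else pvLook t p := by
  by_cases h : r.1 = p
  · unfold pvLook
    rw [List.find?_cons_of_pos (by simp [h]), if_pos h]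
    rfl
  · unfold pvLook
    rw [List.find?_cons_of_neg (by simp [h]), if_neg h]

theorem pvLook_map_upd (F : List (Int × Int × Int)) (k s1 p : Int) :
    pvLook (F.map (fun r => if r.1 == k then (k, (s1, (1 : Int))) else r)) p
      = if p = k then (pvLook F k).map (fun _ => (s1, (1 : Int))) else pvLook F p := by
  induction F with
  | nil => by_cases h : p = k <;> simp [h, pvLook]
  | cons r t ih =>
    rw [List.map_cons]
    by_cases hr : r.1 = k
    · rw [if_pos (by simp [hr])]
      by_cases hp : p = k
      · subst hp
        rw [if_pos rfl, pvLook_cons, pvLook_cons,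
          if_pos (show ((p, (s1, (1 : Int))) : Int × Int × Int).1 = p from rfl),
          if_pos hr]
        rfl
      · rw [if_neg hp, pvLook_cons, pvLook_cons,
          if_neg (show ¬(((k, (s1, (1 : Int))) : Int × Int × Int).1 = p) from
            fun hc => hp (hc.symm : p = k)),
          if_neg (show ¬(r.1 = p) from fun hc => hp (hc.symm.trans hr))]
        have h2 := ih
        rw [if_neg hp] at h2
        exact h2
    · rw [if_neg (by simp [hr])]
      by_cases hp : p = k
      · rw [if_pos hp, pvLook_cons, pvLook_cons,
          if_neg (show ¬(r.1 = p) from fun hc => hr (hp ▸ hc)),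
          if_neg (show ¬(r.1 = k) from hr)]
        have h2 := ih
        rw [if_pos hp] at h2
        exact h2
      · rw [if_neg hp, pvLook_cons, pvLook_cons]
        by_cases hq : r.1 = p
        · rw [if_pos hq, if_pos hq]
        · rw [if_neg hq, if_neg hq]
          have h2 := ih
          rw [if_neg hp] at h2
          exact h2

theorem pvVC_upd (F : List (Int × Int × Int)) (k s1 : Int) (x : Int × Int) :
    pvVC (F.map (fun r => if r.1 == k then (k, (s1, (1 : Int))) else r)) x
      = (pvVC F x && !(x.2 == k)) := by
  unfold pvVC
  rw [pvLook_map_upd]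
  by_cases hx : x.2 = k
  · rw [if_pos hx, hx]
    cases h : pvLook F k with
    | none => simp
    | some v => simp
  · rw [if_neg hx]
    cases h : pvLook F x.2 <;> simp [hx]

theorem pvVA_upd (F : List (Int × Int × Int)) (k s1 m : Int) (x : Int × Int)
    (h : pvLook F k = some (s1, m)) :
    pvVA (F.map (fun r => if r.1 == k then (k, (s1, (1 : Int))) else r)) x = pvVA F x := by
  unfold pvVA
  rw [pvLook_map_upd]
  by_cases hx : x.2 = k
  · rw [if_pos hx, hx, h]
    simp
  · rw [if_neg hx]

-- erase victim then append a fresh page: validity of an old entry (seq bound) loses the victim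
theorem pvVC_evict (F : List (Int × Int × Int)) (victim page seq bit : Int)
    (hpk : page ∉ F.map Prod.fst) (x : Int × Int) (hx : x.1 < seq) :
    pvVC (F.filter (fun r => !(r.1 == victim)) ++ [(page, (seq, bit))]) x
      = (pvVC F x && !(x.2 == victim)) := by
  unfold pvVC
  by_cases hp : x.2 = page
  · rw [hp, pvLook_append_self _ _ (pvLook_eq_none _ _ (pvNotMem_filter F page _ hpk))]
    have h2 : pvLook F x.2 = none := by rw [hp]; exact pvLook_eq_none F page hpk
    rw [hp] at h2
    rw [h2]
    have hsx : (seq == x.1) = false := by simp; omega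
    simp [hsx]
  · by_cases hv : x.2 = victim
    · rw [pvLook_append_ne _ _ _ (by simp [hp])]
      rw [hv, pvLook_eq_none (F.filter (fun r => !(r.1 == victim))) victim (by
        intro hc
        rcases List.mem_map.mp hc with ⟨r, hr, hk⟩
        have := List.mem_filter.mp hr
        simp [hk] at this)]
      simp [hv]
    · rw [pvLook_append_ne _ _ _ (by simp [hp]), pvLook_filter_ne _ _ _ hv]
      cases pvLook F x.2 <;> simp [hv]

theorem pvVA_evict (F : List (Int × Int × Int)) (victim page seq bit : Int)
    (hpk : page ∉ F.map Prod.fst) (x : Int × Int) (hx : x.1 < seq) :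
    pvVA (F.filter (fun r => !(r.1 == victim)) ++ [(page, (seq, bit))]) x
      = (pvVA F x && !(x.2 == victim)) := by
  unfold pvVA
  by_cases hp : x.2 = page
  · rw [hp, pvLook_append_self _ _ (pvLook_eq_none _ _ (pvNotMem_filter F page _ hpk))]
    have h2 : pvLook F page = none := pvLook_eq_none F page hpk
    rw [hp] at *
    rw [h2]
    have hsx : (seq == x.1) = false := by simp; omega
    simp [hsx]
  · by_cases hv : x.2 = victim
    · rw [pvLook_append_ne _ _ _ (by simp [hp])]
      rw [hv, pvLook_eq_none (F.filter (fun r => !(r.1 == victim))) victim (by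
        intro hc
        rcases List.mem_map.mp hc with ⟨r, hr, hk⟩
        have := List.mem_filter.mp hr
        simp [hk] at this)]
      simp [hv]
    · rw [pvLook_append_ne _ _ _ (by simp [hp]), pvLook_filter_ne _ _ _ hv]
      cases pvLook F x.2 <;> simp [hv]

theorem pvVC_append (F : List (Int × Int × Int)) (page seq bit : Int)
    (hpk : page ∉ F.map Prod.fst) (x : Int × Int) (hx : x.1 < seq) :
    pvVC (F ++ [(page, (seq, bit))]) x = pvVC F x := by
  unfold pvVC
  by_cases hp : x.2 = page
  · rw [hp, pvLook_append_self _ _ (pvLook_eq_none _ _ hpk)]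
    have h2 : pvLook F page = none := pvLook_eq_none F page hpk
    rw [hp] at *
    rw [h2]
    have hsx : (seq == x.1) = false := by simp; omega
    simp [hsx]
  · rw [pvLook_append_ne _ _ _ (by simp [hp])]

theorem pvVA_append (F : List (Int × Int × Int)) (page seq bit : Int)
    (hpk : page ∉ F.map Prod.fst) (x : Int × Int) (hx : x.1 < seq) :
    pvVA (F ++ [(page, (seq, bit))]) x = pvVA F x := by
  unfold pvVA
  by_cases hp : x.2 = page
  · rw [hp, pvLook_append_self _ _ (pvLook_eq_none _ _ hpk)]
    have h2 : pvLook F page = none := pvLook_eq_none F page hpk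
    rw [hp] at *
    rw [h2]
    have hsx : (seq == x.1) = false := by simp; omega
    simp [hsx]
  · rw [pvLook_append_ne _ _ _ (by simp [hp])]

-- new singleton entries are valid exactly as expected
theorem pvVC_new (F : List (Int × Int × Int)) (page seq bit : Int)
    (h : pvLook F page = none) :
    pvVC (F ++ [(page, (seq, bit))]) (seq, page) = (bit == 0) := by
  unfold pvVC
  rw [pvLook_append_self _ _ h]
  simp

theorem pvVA_new (F : List (Int × Int × Int)) (page seq bit : Int)
    (h : pvLook F page = none) :
    pvVA (F ++ [(page, (seq, bit))]) (seq, page) = true := by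
  unfold pvVA
  rw [pvLook_append_self _ _ h]
  simp

-- ---- the main simulation ----
theorem pvGo_eq (pt' : List Int) : ∀ (db' db : List Int) (k : Nat) (fs pf wb seq : Int)
    (frames : PySem.Dict Int (Int × Int)) (cq fq : List (Int × Int)),
    1 ≤ fs → db.drop k = db' → k + pt'.length ≤ db.length →
    pvInv frames.items cq fq seq →
    pvQQGo db fs (PySem.List.enumerate pt' (k : Int)) pf (pf + wb) wb (frames.items.map pvPm)
      = pvAltGo fs pt' db' frames cq fq seq pf wb := by
  induction pt' with
  | nil =>
    intro db' db k fs pf wb seq frames cq fq _ _ _ _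
    cases db' <;> rfl
  | cons page pt'' ih =>
    intro db' db k fs pf wb seq frames cq fq hfs hdrop hlen hinv
    obtain ⟨hnd, hbnd, hbc, hbf, hic, hif⟩ := hinv
    have hk : k < db.length := by simp at hlen; omega
    obtain ⟨bit, db'', hdb'⟩ : ∃ b t, db' = b :: t := by
      rcases hdb : db' with _ | ⟨b, t⟩
      · rw [hdb] at hdrop
        have := List.length_drop (l := db) (i := k)
        rw [hdrop] at this
        simp at this
        omega
      · exact ⟨b, t, rfl⟩
    subst hdb'
    have hget : db[k]? = some bit := by
      have : (db.drop k)[0]? = db[k + 0]? := List.getElem?_drop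
      rw [hdrop] at this
      simpa using this.symm
    have hbit : PySem.List.pyGetD db (k : Int) 0 = bit := by
      rw [PySem.List.pyGetD_natCast, List.getD_eq_getElem?_getD, hget]
      rfl
    have henum : PySem.List.enumerate (page :: pt'') (k : Int)
        = ((k : Int), page) :: PySem.List.enumerate pt'' ((k : Int) + 1) := rfl
    have hdrop' : db.drop (k + 1) = db'' := by
      have : (db.drop k).tail = db.drop (k + 1) := by
        rw [← List.drop_drop]
        simp
      rw [hdrop] at this
      exact this.symm
    have hlen' : (k + 1) + pt''.length ≤ db.length := by simp at hlen ⊢; omega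
    have hcast : ((k : Int) + 1) = ((k + 1 : Nat) : Int) := by push_cast; ring
    rw [henum]
    simp only [pvQQGo, pvAltGo, hbit]
    rw [hcast]
    cases hg : frames.get? page with
    | some e =>
      -- HIT
      have hfindF : frames.items.find? (fun r => r.1 == page) = some (page, e) :=
        pvLook_some_elim frames.items page e hg
      have hfindq : (frames.items.map pvPm).find? (fun d => d.1 == page)
          = some (page, e.2) := by
        rw [pvFindPm, hfindF]; rfl
      rw [pvHitGo_some page bit _ _ (page, e.2) hfindq]
      have hqnd : ((frames.items.map pvPm).map Prod.fst).Nodup := by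
        rw [pvKeysPm]; exact hnd
      have hcont : frames.contains page = true := by
        rw [PySem.Dict.contains_eq_isSome_get?, hg]; rfl
      by_cases hbne : bit ≠ 0
      · simp only [if_pos hbne]
        rw [pvSet_eq_map _ page (page, e.2) hqnd hfindq]
        have hitems' : (frames.insert page (e.1, 1)).items
            = frames.items.map (fun r => if r.1 == page then (page, (e.1, (1 : Int))) else r) :=
          PySem.Dict.items_insert_of_contains frames (e.1, 1) hcont
        rw [pvUpdComm frames.items page e.1, ← hitems']
        refine ih db'' db (k + 1) fs pf wb seq _ cq fq hfs hdrop' hlen' ?_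
        rw [hitems']
        refine ⟨?_, ?_, hbc, hbf, ?_, ?_⟩
        · rw [pvKeys_map_upd]; exact hnd
        · intro r hr
          rcases List.mem_map.mp hr with ⟨r0, hr0, hup⟩
          by_cases h0 : r0.1 = page
          · rw [← hup]
            simp only [h0, beq_self_eq_true, if_true]
            exact hbnd (page, e) (List.mem_of_find?_eq_some hfindF)
          · rw [← hup, if_neg (by simp [h0])]
            exact hbnd r0 hr0
        · have h1 : cq.filter (pvVC (frames.items.map (fun r => if r.1 == page then (page, (e.1, (1:Int))) else r)))
              = (cq.filter (pvVC frames.items)).filter (fun x => !(x.2 == page)) := by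
            rw [← pvFilterAnd]
            exact List.filter_congr (fun x _ => pvVC_upd frames.items page e.1 x)
          rw [h1, hic, pvFilterSp, pvCleanUpd]
        · have h1 : fq.filter (pvVA (frames.items.map (fun r => if r.1 == page then (page, (e.1, (1:Int))) else r)))
              = fq.filter (pvVA frames.items) :=
            List.filter_congr (fun x _ => pvVA_upd frames.items page e.1 e.2 x
              (by rw [← pvGet?_eq, hg]))
          rw [h1, hif, List.map_map]
          apply List.map_congr_left
          intro r hr
          by_cases h0 : r.1 = page
          · have hre : r = (page, e) := by
              have hl : pvLook frames.items r.1 = some r.2 :=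
                pvLook_mem frames.items r.1 r.2 hnd (by simpa using hr)
              rw [h0, ← pvGet?_eq, hg] at hl
              have h2 : e = r.2 := by simpa using hl
              calc r = (r.1, r.2) := rfl
                _ = (page, e) := by rw [h0, ← h2]
            simp [Function.comp, hre, pvSp]
          · simp [Function.comp, h0, pvSp]
      · simp only [if_neg hbne]
        exact ih db'' db (k + 1) fs pf wb seq frames cq fq hfs hdrop' hlen'
          ⟨hnd, hbnd, hbc, hbf, hic, hif⟩
    | none =>
      -- MISS
      have hfindF : frames.items.find? (fun r => r.1 == page) = none :=
        pvLook_none_elim frames.items page hg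
      have hfindq : (frames.items.map pvPm).find? (fun d => d.1 == page) = none := by
        rw [pvFindPm, hfindF]; rfl
      rw [pvHitGo_none page bit _ _ hfindq]
      have hpk : page ∉ frames.items.map Prod.fst :=
        pvNotMemKeys_of_look_none frames.items page hg
      have hsize : ((frames.size : Int)) = (((frames.items.map pvPm).length : Nat) : Int) := by
        simp [PySem.Dict.size]
      simp only [Bool.false_eq_true, if_false]
      by_cases hful : (((frames.items.map pvPm).length : Nat) : Int) = fs
      · rw [if_pos hful]
        cases hfc : frames.items.filter pvClean with
        | cons c tF =>
          -- a clean frame exists: A removes the first clean dict, B pops the clean queue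
          have hfind : frames.items.find? pvClean = some c := by
            rw [pvFindEqHeadFilter, hfc]; rfl
          have hcF : c ∈ frames.items := List.mem_of_find?_eq_some hfind
          have hfindqc : (frames.items.map pvPm).find? (fun d => d.2 == 0) = some (pvPm c) := by
            rw [pvFindCleanPm, hfind]; rfl
          rw [pvEvictGo_some _ _ (pvPm c) hfindqc]
          have hqnd : ((frames.items.map pvPm).map Prod.fst).Nodup := by
            rw [pvKeysPm]; exact hnd
          have hmemq : pvPm c ∈ frames.items.map pvPm := List.mem_map.mpr ⟨c, hcF, rfl⟩
          rw [pvErase_eq _ (pvPm c) hqnd hmemq]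
          have hq1 : ((frames.items.map pvPm).filter (fun p => !(p.1 == (pvPm c).1))).length
              = (frames.items.map pvPm).length - 1 := by
            rw [← pvErase_eq _ (pvPm c) hqnd hmemq,
              PySem.List.remove?_eq_some_erase _ (pvPm c) hmemq]
            simp [List.length_erase_of_mem hmemq]
          have hqpos : 0 < (frames.items.map pvPm).length := List.length_pos_of_mem hmemq
          rw [if_neg (show ¬((((frames.items.map pvPm).filter (fun p => !(p.1 == (pvPm c).1))).length : Int) = fs) from by
            rw [hq1]; omega)]
          rw [if_pos (show ((frames.size : Int) = fs) from by rw [hsize]; exact hful)]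
          -- B pops the clean queue
          have hfcq : cq.filter (pvVC frames.items) = pvSp c :: tF.map pvSp := by
            rw [hic, hfc]; rfl
          obtain ⟨t, hdropcq, htf⟩ := pvPopSpec _ cq (pvSp c) (tF.map pvSp) hfcq
          rw [pvCleanPop_eq, hdropcq, show pvSp c = (c.2.1, c.1) from rfl]
          dsimp only
          -- keys facts
          have hndc : ((frames.items.filter pvClean).map Prod.fst).Nodup :=
            pvNodup_filter frames.items pvClean hnd
          have hc1tF : c.1 ∉ tF.map Prod.fst := by
            have h2 : ((c :: tF).map Prod.fst).Nodup := hfc ▸ hndc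
            rw [List.map_cons, List.nodup_cons] at h2
            exact h2.1
          have hvmem : c.1 ∈ frames.items.map Prod.fst := List.mem_map.mpr ⟨c, hcF, rfl⟩
          have hpnev : page ≠ c.1 := fun hpc => hpk (hpc ▸ hvmem)
          -- B's new items list
          have hcontE : ((frames.erase c.1).contains page) = false := by
            rw [PySem.Dict.contains_eq_isSome_get?, pvGet?_eq]
            have hEi : (frames.erase c.1).items = frames.items.filter (fun r => !(r.1 == c.1)) := by
              simp [PySem.Dict.erase]
            rw [hEi, pvLook_filter_ne _ _ _ hpnev, ← pvGet?_eq, hg]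
            rfl
          have hitems1 : ((frames.erase c.1).insert page (seq, bit)).items
              = frames.items.filter (fun r => !(r.1 == c.1)) ++ [(page, (seq, bit))] := by
            rw [PySem.Dict.items_insert_of_not_contains _ (seq, bit) hcontE]
            rfl
          have hqmatch : (frames.items.map pvPm).filter (fun p => !(p.1 == (pvPm c).1)) ++ [(page, bit)]
              = (((frames.erase c.1).insert page (seq, bit)).items).map pvPm := by
            rw [hitems1, List.map_append, pvFilterPm]
            rfl
          rw [hqmatch, show pf + wb + 1 = (pf + 1) + wb by ring]
          refine ih db'' db (k + 1) fs (pf + 1) wb (seq + 1) _ _ _ hfs hdrop' hlen' ?_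
          rw [hitems1]
          have hbndt : ∀ x ∈ t, x.1 < seq := by
            intro x hx
            have hxc : x ∈ cq := (List.dropWhile_sublist _).subset
              (by rw [hdropcq]; exact List.mem_cons_of_mem _ hx)
            exact hbc x hxc
          have hclean1 : (frames.items.filter (fun r => !(r.1 == c.1)) ++ [(page, (seq, bit))]).filter pvClean
              = tF ++ (if bit = 0 then [(page, (seq, bit))] else []) := by
            rw [List.filter_append]
            congr 1
            · rw [pvFilterComm, hfc, List.filter_cons_of_neg (by simp),
                pvFilter_id_of_not_mem tF c.1 hc1tF]
            · by_cases hb : bit = 0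
              · rw [if_pos hb]
                simp [pvClean, hb]
              · rw [if_neg hb]
                simp [pvClean, hb]
          have hstepC : ∀ x ∈ t, pvVC (frames.items.filter (fun r => !(r.1 == c.1)) ++ [(page, (seq, bit))]) x
              = (pvVC frames.items x && !(x.2 == c.1)) :=
            fun x hx => pvVC_evict frames.items c.1 page seq bit hpk x (hbndt x hx)
          have hstepF : ∀ x ∈ fq, pvVA (frames.items.filter (fun r => !(r.1 == c.1)) ++ [(page, (seq, bit))]) x
              = (pvVA frames.items x && !(x.2 == c.1)) :=
            fun x hx => pvVA_evict frames.items c.1 page seq bit hpk x (hbf x hx)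
          have htff : t.filter (pvVC (frames.items.filter (fun r => !(r.1 == c.1)) ++ [(page, (seq, bit))]))
              = tF.map pvSp := by
            rw [List.filter_congr hstepC, pvFilterAnd, htf, pvFilterSp,
              pvFilter_id_of_not_mem tF c.1 hc1tF]
          refine ⟨?_, ?_, ?_, ?_, ?_, ?_⟩
          · exact pvNodup_append _ page (seq, bit)
              (pvNodup_filter frames.items _ hnd) (pvNotMem_filter frames.items page _ hpk)
          · intro r hr
            rcases List.mem_append.mp hr with h | h
            · have := hbnd r (List.mem_of_mem_filter h)
              omega
            · simp at h
              rw [h]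
              show seq < seq + 1
              omega
          · intro x hx
            by_cases hb : bit = 0
            · rw [if_pos hb] at hx
              rcases List.mem_append.mp hx with h | h
              · have := hbndt x h; omega
              · simp at h; rw [h]; show seq < seq + 1; omega
            · rw [if_neg hb] at hx
              have := hbndt x hx; omega
          · intro x hx
            rcases List.mem_append.mp hx with h | h
            · have := hbf x h; omega
            · simp at h; rw [h]; show seq < seq + 1; omega
          · rw [hclean1]
            by_cases hb : bit = 0
            · rw [if_pos hb, if_pos hb, List.filter_append, htff]
              rw [List.filter_cons_of_pos]
              · rw [List.map_append]
                rfl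
              · rw [pvVC_new _ page seq bit (pvLook_eq_none _ _ (pvNotMem_filter frames.items page _ hpk))]
                simp [hb]
            · rw [if_neg hb, if_neg hb, List.append_nil, htff]
          · rw [List.filter_append, List.filter_congr hstepF, pvFilterAnd, hif, pvFilterSp,
              List.filter_cons_of_pos (pvVA_new _ page seq bit (pvLook_eq_none _ _ (pvNotMem_filter frames.items page _ hpk))),
              List.map_append]
            rfl
        | nil =>
          -- no clean frame: A pops the oldest dict, B pops the fifo queue
          have hfind : frames.items.find? pvClean = none := by
            rw [pvFindEqHeadFilter, hfc]; rfl
          have hfindqc : (frames.items.map pvPm).find? (fun d => d.2 == 0) = none := by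
            rw [pvFindCleanPm, hfind]; rfl
          rw [pvEvictGo_none _ _ hfindqc]
          rw [if_pos hful]
          rw [if_pos (show ((frames.size : Int) = fs) from by rw [hsize]; exact hful)]
          have hfcq : cq.filter (pvVC frames.items) = [] := by rw [hic, hfc]; rfl
          rw [pvCleanPop_eq, pvPopNil _ cq hfcq]
          obtain ⟨r0, Ft, hF⟩ : ∃ r0 Ft, frames.items = r0 :: Ft := by
            cases hFc : frames.items with
            | nil => rw [hFc] at hful; simp at hful; omega
            | cons a l => exact ⟨a, l, rfl⟩
          have hfqf : fq.filter (pvVA frames.items) = pvSp r0 :: Ft.map pvSp := by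
            rw [hif, hF]; rfl
          obtain ⟨t, hdropfq, htf⟩ := pvPopSpec _ fq (pvSp r0) (Ft.map pvSp) hfqf
          rw [pvFifoPop_eq, hdropfq, show pvSp r0 = (r0.2.1, r0.1) from rfl]
          dsimp only
          have h2nd : r0.1 ∉ Ft.map Prod.fst ∧ (Ft.map Prod.fst).Nodup := by
            have h2 : ((r0 :: Ft).map Prod.fst).Nodup := hF ▸ hnd
            rw [List.map_cons, List.nodup_cons] at h2
            exact h2
          have hvmem : r0.1 ∈ frames.items.map Prod.fst := by rw [hF]; simp
          have hpnev : page ≠ r0.1 := fun hpc => hpk (hpc ▸ hvmem)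
          have hfilterF : frames.items.filter (fun r => !(r.1 == r0.1)) = Ft := by
            rw [hF, List.filter_cons_of_neg (by simp), pvFilter_id_of_not_mem Ft r0.1 h2nd.1]
          have hcontE : ((frames.erase r0.1).contains page) = false := by
            rw [PySem.Dict.contains_eq_isSome_get?, pvGet?_eq]
            have hEi : (frames.erase r0.1).items = frames.items.filter (fun r => !(r.1 == r0.1)) := by
              simp [PySem.Dict.erase]
            rw [hEi, pvLook_filter_ne _ _ _ hpnev, ← pvGet?_eq, hg]
            rfl
          have hitems1 : ((frames.erase r0.1).insert page (seq, bit)).items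
              = frames.items.filter (fun r => !(r.1 == r0.1)) ++ [(page, (seq, bit))] := by
            rw [PySem.Dict.items_insert_of_not_contains _ (seq, bit) hcontE]
            rfl
          have hqmatch : (frames.items.map pvPm).tail ++ [(page, bit)]
              = (((frames.erase r0.1).insert page (seq, bit)).items).map pvPm := by
            rw [hitems1, List.map_append, hfilterF, hF]
            rfl
          rw [hqmatch, show pf + wb + 1 + 1 = (pf + 1) + (wb + 1) by ring]
          refine ih db'' db (k + 1) fs (pf + 1) (wb + 1) (seq + 1) _ _ _ hfs hdrop' hlen' ?_
          rw [hitems1, hfilterF]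
          have hbndt : ∀ x ∈ t, x.1 < seq := by
            intro x hx
            have hxf : x ∈ fq := (List.dropWhile_sublist _).subset
              (by rw [hdropfq]; exact List.mem_cons_of_mem _ hx)
            exact hbf x hxf
          have hFtc : Ft.filter pvClean = [] := by
            have h2 := hfc
            rw [hF] at h2
            by_cases hcr : pvClean r0
            · rw [List.filter_cons_of_pos hcr] at h2; cases h2
            · rwa [List.filter_cons_of_neg hcr] at h2
          have hpkFt : page ∉ Ft.map Prod.fst := by
            intro hc
            exact hpk (by rw [hF]; simp [hc])
          refine ⟨?_, ?_, ?_, ?_, ?_, ?_⟩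
          · exact pvNodup_append Ft page (seq, bit) h2nd.2 hpkFt
          · intro r hr
            rcases List.mem_append.mp hr with h | h
            · have := hbnd r (by rw [hF]; exact List.mem_cons_of_mem _ h)
              omega
            · simp at h; rw [h]; show seq < seq + 1; omega
          · intro x hx
            by_cases hb : bit = 0
            · rw [if_pos hb] at hx
              simp at hx
              rw [hx]
              show seq < seq + 1
              omega
            · rw [if_neg hb] at hx
              simp at hx
          · intro x hx
            rcases List.mem_append.mp hx with h | h
            · have := hbndt x h; omega
            · simp at h; rw [h]; show seq < seq + 1; omega
          · have hcf1 : (Ft ++ [(page, (seq, bit))]).filter pvClean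
                = if bit = 0 then [(page, (seq, bit))] else [] := by
              rw [List.filter_append, hFtc]
              by_cases hb : bit = 0
              · rw [if_pos hb]; simp [pvClean, hb]
              · rw [if_neg hb]; simp [pvClean, hb]
            rw [hcf1]
            by_cases hb : bit = 0
            · rw [if_pos hb, if_pos hb]
              rw [List.filter_cons_of_pos]
              · rfl
              · rw [pvVC_new Ft page seq bit (pvLook_eq_none _ _ hpkFt)]
                simp [hb]
            · rw [if_neg hb, if_neg hb]
              rfl
          · have hstepF : ∀ x ∈ t, pvVA (Ft ++ [(page, (seq, bit))]) x
                = (pvVA frames.items x && !(x.2 == r0.1)) := by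
              intro x hx
              rw [← hfilterF]
              exact pvVA_evict frames.items r0.1 page seq bit hpk x (hbndt x hx)
            rw [List.filter_append, List.filter_congr hstepF, pvFilterAnd, htf, pvFilterSp,
              pvFilter_id_of_not_mem Ft r0.1 h2nd.1,
              List.filter_cons_of_pos (pvVA_new Ft page seq bit (pvLook_eq_none _ _ hpkFt)),
              List.map_append]
            rfl
      · rw [if_neg hful]
        rw [if_neg (show ¬((frames.size : Int) = fs) from by rw [hsize]; exact hful)]
        have hcont : frames.contains page = false := by
          rw [PySem.Dict.contains_eq_isSome_get?, hg]; rfl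
        have hitems1 : (frames.insert page (seq, bit)).items
            = frames.items ++ [(page, (seq, bit))] :=
          PySem.Dict.items_insert_of_not_contains frames (seq, bit) hcont
        have hqmatch : frames.items.map pvPm ++ [(page, bit)]
            = ((frames.insert page (seq, bit)).items).map pvPm := by
          rw [hitems1, List.map_append]
          rfl
        rw [hqmatch, show pf + wb + 1 = (pf + 1) + wb by ring]
        refine ih db'' db (k + 1) fs (pf + 1) wb (seq + 1) _ _ _ hfs hdrop' hlen' ?_
        rw [hitems1]
        refine ⟨?_, ?_, ?_, ?_, ?_, ?_⟩
        · exact pvNodup_append _ page (seq, bit) hnd hpk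
        · intro r hr
          rcases List.mem_append.mp hr with h | h
          · have := hbnd r h; omega
          · simp at h; rw [h]; show seq < seq + 1; omega
        · intro x hx
          by_cases hb : bit = 0
          · rw [if_pos hb] at hx
            rcases List.mem_append.mp hx with h | h
            · have := hbc x h; omega
            · simp at h; rw [h]; show seq < seq + 1; omega
          · rw [if_neg hb] at hx
            have := hbc x hx; omega
        · intro x hx
          rcases List.mem_append.mp hx with h | h
          · have := hbf x h; omega
          · simp at h; rw [h]; show seq < seq + 1; omega
        · have hstep : ∀ x ∈ cq, pvVC (frames.items ++ [(page, (seq, bit))]) x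
              = pvVC frames.items x :=
            fun x hx => pvVC_append frames.items page seq bit hpk x (hbc x hx)
          by_cases hb : bit = 0
          · rw [if_pos hb, List.filter_append, List.filter_congr hstep, hic,
              List.filter_append, List.map_append]
            congr 1
            rw [List.filter_cons_of_pos (show pvVC (frames.items ++ [(page, (seq, bit))]) (seq, page) = true from by
                rw [pvVC_new _ page seq bit (pvLook_eq_none _ _ hpk)]; simp [hb]),
              List.filter_cons_of_pos (show pvClean ((page, (seq, bit)) : Int × Int × Int) = true from by
                simp [pvClean, hb])]
            rfl
          · rw [if_neg hb, List.filter_congr hstep, hic, List.filter_append,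
              List.filter_cons_of_neg (show ¬(pvClean ((page, (seq, bit)) : Int × Int × Int) = true) from by
                simp [pvClean, hb])]
            simp
        · have hstep : ∀ x ∈ fq, pvVA (frames.items ++ [(page, (seq, bit))]) x
              = pvVA frames.items x :=
            fun x hx => pvVA_append frames.items page seq bit hpk x (hbf x hx)
          rw [List.filter_append, List.filter_congr hstep, hif,
            List.filter_cons_of_pos (pvVA_new _ page seq bit (pvLook_eq_none _ _ hpk)),
            List.map_append]
          rfl

-- ===== VERDICT (by name: the statement is the Claim_ definition above) =====
theorem QQ_spec : Claim_equal_QQ := by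
  intro pt db fs _hdom hpre
  unfold Spec_QQ QQ QQ_alt
  cases pt with
  | nil => rfl
  | cons a l =>
    have hfs : 1 ≤ fs := by
      rcases hpre.2.2 with h | h
      · cases h
      · exact h
    have h := pvGo_eq (a :: l) db db 0 fs 0 0 0 PySem.Dict.empty [] [] hfs
      (by simp) (by simpa using hpre.1)
      ⟨by simp [PySem.Dict.empty], by simp [PySem.Dict.empty], by simp, by simp, rfl, rfl⟩
    simpa using h
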